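-- pv_equiv track=rewrite | github.com/Acreast/leetcode | 1550-ThreeConsecutiveOdds/version/python3/1550-ThreeConsecutiveOdds_20250511_182259.py | threeConsecutiveOdds
-- ===== SOURCE A (Python) =====
-- from typing import List
--
-- def threeConsecutiveOdds(arr: List[int]) -> bool:
--     cons_odd = 0
--     for num in arr:
--         if num % 2 != 0:
--             cons_odd += 1
--         else:
--             cons_odd = 0
--         if cons_odd == 3:
--             return True
--     return False
-- ===== SOURCE B (Python) =====
-- from typing import List
--
-- def threeConsecutiveOdds(arr: List[int]) -> bool:
--     return any(a % 2 and b % 2 and c % 2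
--                for a, b, c in zip(arr, arr[1:], arr[2:]))
-- ===== Notes on version B (the rewrite author's own statement) =====
-- stated objective: simpler
-- what changed: Replaced the stateful running-counter loop with a stateless one-liner: any() over three-element windows obtained by zipping arr with its two shifted copies.
import Mathlib
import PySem

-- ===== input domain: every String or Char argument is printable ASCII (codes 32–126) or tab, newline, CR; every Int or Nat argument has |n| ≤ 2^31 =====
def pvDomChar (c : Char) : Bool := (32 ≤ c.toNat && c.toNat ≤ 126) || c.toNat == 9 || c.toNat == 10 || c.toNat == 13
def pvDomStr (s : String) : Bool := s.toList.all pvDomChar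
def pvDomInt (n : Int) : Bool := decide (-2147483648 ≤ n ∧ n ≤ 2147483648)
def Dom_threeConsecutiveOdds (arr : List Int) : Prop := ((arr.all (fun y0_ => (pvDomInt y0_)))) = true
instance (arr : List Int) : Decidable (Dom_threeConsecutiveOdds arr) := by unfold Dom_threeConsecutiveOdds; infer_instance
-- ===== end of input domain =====

-- B replaces A's running-counter loop with a stateless any() over three-element windows
-- made by zipping arr with its two shifted copies (objective: simpler).


-- num % 2 != 0, as in both Pythons (divisor 2 is positive: PySem.Int.mod is exact)
def pyOdd (n : Int) : Bool := decide (PySem.Int.mod n 2 ≠ 0)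

-- ===== PORT A =====
-- the loop over arr carrying the running counter cons_odd; early 'return True' = stop with true
def threeConsecutiveOddsGo : List Int → Int → Bool
  | [], _ => false
  | num :: rest, consOdd =>
      let consOdd' := if pyOdd num then consOdd + 1 else 0
      if consOdd' == 3 then true else threeConsecutiveOddsGo rest consOdd'

def threeConsecutiveOdds (arr : List Int) : Bool :=
  threeConsecutiveOddsGo arr 0

-- ===== PORT B =====
-- any(a % 2 and b % 2 and c % 2 for a, b, c in zip(arr, arr[1:], arr[2:]))
def threeConsecutiveOdds_alt (arr : List Int) : Bool :=
  (arr.zip ((PySem.List.slice arr (some 1) none).zip (PySem.List.slice arr (some 2) none))).any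
    (fun t => pyOdd t.1 && pyOdd t.2.1 && pyOdd t.2.2)

-- ===== PRECONDITION & SPEC =====
def Spec_threeConsecutiveOdds (arr : List Int) (out : Bool) : Prop := out = threeConsecutiveOdds_alt arr
instance (arr : List Int) (out : Bool) : Decidable (Spec_threeConsecutiveOdds arr out) := by unfold Spec_threeConsecutiveOdds; infer_instance

-- ===== CLAIM (what is proved, stated in full; the proofs are below) =====
def Claim_equal_threeConsecutiveOdds : Prop := ∀ (arr : List Int), Dom_threeConsecutiveOdds arr → Spec_threeConsecutiveOdds arr (threeConsecutiveOdds arr)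

-- ===== LEMMAS AND PROOFS =====

-- reference function: true iff some window of three consecutive elements is all odd
def win3 : List Int → Bool
  | a :: b :: c :: rest => (pyOdd a && pyOdd b && pyOdd c) || win3 (b :: c :: rest)
  | _ => false

-- first element is odd
def w1 : List Int → Bool
  | a :: _ => pyOdd a
  | _ => false

-- first two elements are odd
def w2 : List Int → Bool
  | a :: b :: _ => pyOdd a && pyOdd b
  | _ => false

lemma win3_cons_even {a : Int} {r : List Int} (h : pyOdd a = false) :
    win3 (a :: r) = win3 r := by
  match r with
  | [] => simp [win3]
  | [b] => simp [win3]
  | b :: c :: t => simp [win3, h]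

lemma win3_cons_odd {a : Int} {r : List Int} (h : pyOdd a = true) :
    win3 (a :: r) = (w2 r || win3 r) := by
  match r with
  | [] => simp [win3, w2]
  | [b] => simp [win3, w2]
  | b :: c :: t =>
    cases hb : pyOdd b <;> cases hc : pyOdd c <;>
      simp [win3, w2, h, hb, hc]

lemma w1_cons (a : Int) (r : List Int) : w1 (a :: r) = pyOdd a := rfl

lemma w2_cons (a : Int) (r : List Int) : w2 (a :: r) = (pyOdd a && w1 r) := by
  cases r <;> simp [w1, w2]

-- a list whose first two elements are odd has an odd first element
lemma w1_or_w2 (r : List Int) : (w1 r || w2 r) = w1 r := by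
  match r with
  | [] => rfl
  | [a] => simp [w1, w2]
  | a :: b :: t => cases ha : pyOdd a <;> simp [w1, w2, ha]

-- the invariant of A's counter loop, for counter values 0, 1 and 2 jointly
lemma go_eq_win3 (l : List Int) :
    threeConsecutiveOddsGo l 0 = win3 l ∧
    threeConsecutiveOddsGo l 1 = (w2 l || win3 l) ∧
    threeConsecutiveOddsGo l 2 = (w1 l || win3 l) := by
  induction l with
  | nil => simp [threeConsecutiveOddsGo, win3, w1, w2]
  | cons a r ih =>
    obtain ⟨ih0, ih1, ih2⟩ := ih
    cases ha : pyOdd a with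
    | false =>
      refine ⟨?_, ?_, ?_⟩ <;>
        simp [threeConsecutiveOddsGo, ha, ih0, w1_cons, w2_cons, win3_cons_even ha]
    | true =>
      refine ⟨?_, ?_, ?_⟩
      · simpa [threeConsecutiveOddsGo, ha, ih1] using (win3_cons_odd ha).symm
      · simp [threeConsecutiveOddsGo, ha, ih2, w2_cons, win3_cons_odd ha,
          ← Bool.or_assoc, w1_or_w2]
      · simp [threeConsecutiveOddsGo, ha, w1_cons]

-- B's zip-of-shifts scan computes the same window predicate
lemma zipAny_eq_win3 (l : List Int) :
    ((l.zip ((l.drop 1).zip (l.drop 2))).any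
      (fun t => pyOdd t.1 && pyOdd t.2.1 && pyOdd t.2.2)) = win3 l := by
  induction l with
  | nil => simp [win3]
  | cons a r ih =>
    match r, ih with
    | [], _ => simp [win3]
    | [b], _ => simp [win3]
    | b :: c :: t, ih =>
      simp only [List.drop_succ_cons, List.drop_zero, List.zip_cons_cons,
        List.any_cons, win3] at ih ⊢
      rw [ih]

-- ===== VERDICT (by name: the statement is the Claim_ definition above) =====
theorem threeConsecutiveOdds_spec : Claim_equal_threeConsecutiveOdds := by
  intro arr _
  show threeConsecutiveOdds arr = threeConsecutiveOdds_alt arr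
  have h2 : PySem.List.slice arr (some 2) none = arr.drop 2 := by
    simpa using PySem.List.slice_from_natCast arr 2
  rw [threeConsecutiveOdds, threeConsecutiveOdds_alt,
    PySem.List.slice_from_one, h2, ← List.drop_one, (go_eq_win3 arr).1]
  exact (zipAny_eq_win3 arr).symm
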